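-- pv_equiv track=rewrite | github.com/jebickson/IDLE20 | sequentialremoval.py | remove_characters
-- ===== SOURCE A (Python) =====
-- def remove_characters(s):
--     # Generate the sequence of indices (2^n) that are within the length of the string
--     indices_to_remove = []
--     n = 0
--     while True:
--         index = 2 ** n
--         if index < len(s):
--             indices_to_remove.append(index)
--             n += 1
--         else:
--             break
--
--     # Remove the characters at the specified indices
--     result = ''.join(s[i] for i in range(len(s)) if i not in indices_to_remove)
--
--     return result
-- ===== SOURCE B (Python) =====
-- def remove_characters(s):
--     # Kept characters form contiguous blocks between the removed power-of-two
--     # indices: index 0, then for each removed p = 2^k < len(s) the open block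
--     # s[p+1 : 2*p].  O(log n) slices instead of a per-index membership test.
--     n = len(s)
--     blocks = [s[0:1]]
--     p = 1
--     while p < n:
--         blocks.append(s[p + 1 : 2 * p])
--         p *= 2
--     return ''.join(blocks)
-- ===== Notes on version B (the rewrite author's own statement) =====
-- stated objective: faster
-- what changed: B collects the kept characters as O(log n) contiguous slices between consecutive removed power-of-two indices instead of scanning every index and testing membership in the removed-index list.
import Mathlib
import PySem

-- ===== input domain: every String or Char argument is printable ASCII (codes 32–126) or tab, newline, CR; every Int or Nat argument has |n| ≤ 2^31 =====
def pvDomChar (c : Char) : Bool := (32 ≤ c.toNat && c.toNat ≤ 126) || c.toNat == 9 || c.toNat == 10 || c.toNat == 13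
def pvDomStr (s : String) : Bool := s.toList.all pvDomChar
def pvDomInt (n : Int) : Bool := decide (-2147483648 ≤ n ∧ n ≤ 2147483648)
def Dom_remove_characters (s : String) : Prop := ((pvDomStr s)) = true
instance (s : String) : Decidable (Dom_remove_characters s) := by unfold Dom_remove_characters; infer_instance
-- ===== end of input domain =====

-- B gathers the kept characters as O(log n) contiguous slices between consecutive
-- removed power-of-two indices instead of testing every index for membership.

-- ===== PORT A =====
-- the while-True loop collecting indices 2^n < len(s); terminates because 2^n grows
def buildIdx (len : Nat) (n : Nat) : List Nat :=
  if 2 ^ n < len then 2 ^ n :: buildIdx len (n + 1) else []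
termination_by len - 2 ^ n
decreasing_by
  have h2 : 2 ^ n < 2 ^ (n + 1) := Nat.pow_lt_pow_succ (by norm_num)
  omega

def remove_characters (s : String) : String :=
  let L := s.toList
  let idx := buildIdx L.length 0
  -- ''.join(s[i] for i in range(len(s)) if i not in indices_to_remove);
  -- s[i] is exact as getD because i ∈ range(len(s)) is always in range
  String.ofList (((List.range L.length).filter (fun i => !(idx.contains i))).map
    (fun i => L.getD i ' '))

-- ===== PORT B =====
-- the while p < n loop; the extra 0 < p guard only makes the recursion total
-- (the entry point only ever reaches p = 1, 2, 4, …)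
def altBlocks (L : List Char) (p : Nat) : List (List Char) :=
  if 0 < p ∧ p < L.length then
    PySem.List.slice L (some ((p : Int) + 1)) (some (2 * (p : Int))) :: altBlocks L (2 * p)
  else []
termination_by L.length - p

def remove_characters_alt (s : String) : String :=
  let L := s.toList
  String.ofList ((PySem.List.slice L (some 0) (some 1) :: altBlocks L 1).flatten)

-- ===== PRECONDITION & SPEC =====
def Spec_remove_characters (s : String) (out : String) : Prop := out = remove_characters_alt s
instance (s : String) (out : String) : Decidable (Spec_remove_characters s out) := by unfold Spec_remove_characters; infer_instance

-- ===== CLAIM (what is proved, stated in full; the proofs are below) =====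
def Claim_equal_remove_characters : Prop := ∀ (s : String), Dom_remove_characters s → Spec_remove_characters s (remove_characters s)

-- ===== LEMMAS AND PROOFS =====

/-- `i` is a power of two (bounded existential, decidable by computation). -/
def pow2b (i : Nat) : Bool := (List.range (i + 1)).any (fun m => 2 ^ m == i)

lemma pow2b_pow (m : Nat) : pow2b (2 ^ m) = true := by
  have hm : m < 2 ^ m + 1 := by have := Nat.lt_two_pow_self (n := m); omega
  simp only [pow2b, List.any_eq_true, List.mem_range]
  exact ⟨m, hm, by simp⟩

lemma pow2b_iff (i : Nat) : pow2b i = true ↔ ∃ m, i = 2 ^ m := by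
  constructor
  · intro h
    simp only [pow2b, List.any_eq_true, List.mem_range, beq_iff_eq] at h
    obtain ⟨m, _, hm⟩ := h
    exact ⟨m, hm.symm⟩
  · rintro ⟨m, rfl⟩; exact pow2b_pow m

lemma pow2b_between {k i : Nat} (h1 : 2 ^ k < i) (h2 : i < 2 ^ (k + 1)) :
    pow2b i = false := by
  by_contra h
  rw [Bool.not_eq_false, pow2b_iff] at h
  obtain ⟨m, rfl⟩ := h
  have hk : k < m := (Nat.pow_lt_pow_iff_right (by norm_num)).1 h1
  have hk' : m < k + 1 := (Nat.pow_lt_pow_iff_right (by norm_num)).1 h2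
  omega

lemma mem_buildIdx (len n i : Nat) :
    i ∈ buildIdx len n ↔ ∃ m, n ≤ m ∧ i = 2 ^ m ∧ i < len := by
  induction n using buildIdx.induct (len := len) with
  | case1 n h ih =>
    rw [buildIdx, if_pos h, List.mem_cons, ih]
    constructor
    · rintro (rfl | ⟨m, hm, rfl, hlt⟩)
      · exact ⟨n, le_refl n, rfl, h⟩
      · exact ⟨m, by omega, rfl, hlt⟩
    · rintro ⟨m, hm, rfl, hlt⟩
      rcases Nat.eq_or_lt_of_le hm with rfl | hm'
      · exact Or.inl rfl
      · exact Or.inr ⟨m, by omega, rfl, hlt⟩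
  | case2 n h =>
    rw [buildIdx, if_neg h]
    simp only [List.not_mem_nil, false_iff]
    rintro ⟨m, hm, rfl, hlt⟩
    have : 2 ^ n ≤ 2 ^ m := Nat.pow_le_pow_right (by norm_num) hm
    omega

/-- A's membership test equals the power-of-two test on in-range indices. -/
lemma contains_buildIdx (len i : Nat) (hi : i < len) :
    (buildIdx len 0).contains i = pow2b i := by
  cases hp : pow2b i with
  | false =>
    rw [Bool.eq_false_iff]
    intro hc
    rw [List.contains_iff_mem, mem_buildIdx] at hc
    obtain ⟨m, _, rfl, _⟩ := hc
    simp [pow2b_pow] at hp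
  | true =>
    rw [pow2b_iff] at hp
    obtain ⟨m, rfl⟩ := hp
    rw [List.contains_iff_mem, mem_buildIdx]
    exact ⟨m, Nat.zero_le m, rfl, hi⟩

/-- the kept tail: characters at non-power-of-two indices in `[lo, L.length)` -/
def keepFrom (L : List Char) (lo : Nat) : List Char :=
  ((List.range' lo (L.length - lo)).filter (fun i => !pow2b i)).map (fun i => L.getD i ' ')

lemma map_getD_range' (L : List Char) :
    ∀ (c lo : Nat), lo + c ≤ L.length →
      (List.range' lo c).map (fun i => L.getD i ' ') = (L.drop lo).take c := by
  intro c
  induction c with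
  | zero => simp
  | succ c ih =>
    intro lo h
    have hlo : lo < L.length := by omega
    rw [List.range'_succ, List.map_cons, ih (lo + 1) (by omega),
      List.drop_eq_getElem_cons hlo, List.take_succ_cons,
      List.getD_eq_getElem L ' ' hlo]

lemma range'_split (s m n : Nat) :
    List.range' s (m + n) = List.range' s m ++ List.range' (s + m) n := by
  simp

/-- all-kept blocks: a stretch with no power of two is kept whole -/
lemma filter_keep_all {lo c k : Nat} (h1 : 2 ^ k < lo) (h2 : lo + c ≤ 2 ^ (k + 1)) :
    (List.range' lo c).filter (fun i => !pow2b i) = List.range' lo c := by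
  apply List.filter_eq_self.2
  intro i hi
  rw [List.mem_range'_1] at hi
  simp [pow2b_between (by omega : 2 ^ k < i) (by omega : i < 2 ^ (k + 1))]

lemma altBlocks_flatten (L : List Char) :
    ∀ (p : Nat), (∃ k, p = 2 ^ k) → (altBlocks L p).flatten = keepFrom L (p + 1) := by
  intro p
  induction p using altBlocks.induct (L := L) with
  | case1 p h ih =>
    rintro ⟨k, rfl⟩
    have hlt := h.2
    have ih' := ih ⟨k + 1, by ring⟩
    rw [altBlocks, if_pos h, List.flatten_cons, ih']
    have hp1 : (1 : Nat) ≤ 2 ^ k := Nat.one_le_two_pow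
    have hcast : PySem.List.slice L (some ((2 ^ k : Nat) + 1 : Int)) (some (2 * ((2 ^ k : Nat) : Int)))
        = (L.drop (2 ^ k + 1)).take (2 * 2 ^ k - (2 ^ k + 1)) := by
      have := PySem.List.slice_natCast L (2 ^ k + 1) (2 * 2 ^ k)
      push_cast at this ⊢
      convert this using 3
    rw [hcast]
    have h2p : 2 * 2 ^ k = 2 ^ (k + 1) := by ring
    by_cases hbig : 2 ^ (k + 1) < L.length
    · -- split [p+1, len) at 2^(k+1)
      unfold keepFrom
      have hsplit : L.length - (2 ^ k + 1)
          = (2 ^ (k + 1) - (2 ^ k + 1)) + (L.length - 2 ^ (k + 1)) := by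
        have : 2 ^ k < 2 ^ (k + 1) := Nat.pow_lt_pow_succ (by norm_num)
        omega
      rw [hsplit, range'_split, List.filter_append, List.map_append]
      have hmid : 2 ^ k + 1 + (2 ^ (k + 1) - (2 ^ k + 1)) = 2 ^ (k + 1) := by
        have : 2 ^ k < 2 ^ (k + 1) := Nat.pow_lt_pow_succ (by norm_num)
        omega
      rw [hmid]
      congr 1
      · -- the kept block between the two removed indices
        rw [filter_keep_all (by omega) (by omega : 2 ^ k + 1 + (2 ^ (k + 1) - (2 ^ k + 1)) ≤ 2 ^ (k + 1)),
          map_getD_range' L _ _ (by omega)]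
        congr 1
        omega
      · -- the removed index 2^(k+1) heads the second stretch and is filtered out
        have hlen2 : L.length - 2 ^ (k + 1) = (L.length - 2 ^ (k + 1) - 1) + 1 := by omega
        rw [hlen2, List.range'_succ, List.filter_cons, pow2b_pow (k + 1)]
        simp only [Bool.not_true, Bool.false_eq_true, if_false]
        rw [h2p]
        have harg : L.length - (2 ^ (k + 1) + 1) = L.length - 2 ^ (k + 1) - 1 := by omega
        rw [harg]
    · -- the final partial block reaches the end of the string
      have hlen' : L.length ≤ 2 ^ (k + 1) := by omega
      unfold keepFrom
      have hk2 : L.length - (2 * 2 ^ k + 1) = 0 := by omega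
      rw [hk2]
      simp only [List.range'_zero, List.filter_nil, List.map_nil, List.append_nil]
      rw [filter_keep_all (k := k) (by omega) (by omega),
        map_getD_range' L _ _ (by omega)]
      rw [List.take_of_length_le (by rw [List.length_drop]; omega)]
      all_goals exact (List.take_of_length_le (by simp [List.length_drop])).symm
  | case2 p h =>
    rintro ⟨k, rfl⟩
    have hp1 : (1 : Nat) ≤ 2 ^ k := Nat.one_le_two_pow
    have hlen : L.length ≤ 2 ^ k := by omega
    rw [altBlocks, if_neg h]
    unfold keepFrom
    have : L.length - (2 ^ k + 1) = 0 := by omega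
    rw [this]
    simp

lemma remove_characters_eq (s : String) :
    remove_characters s = remove_characters_alt s := by
  unfold remove_characters remove_characters_alt
  set L := s.toList with hL
  simp only [List.flatten_cons]
  congr 1
  have hfilter : (List.range L.length).filter (fun i => !((buildIdx L.length 0).contains i))
      = (List.range L.length).filter (fun i => !pow2b i) := by
    apply List.filter_congr
    intro i hi
    rw [List.mem_range] at hi
    rw [contains_buildIdx L.length i hi]
  rw [hfilter]
  have hslice : PySem.List.slice L (some 0) (some 1) = L.take 1 := by
    simp [PySem.List.slice_to L (b := 1) (by norm_num)]
  have hblocks := altBlocks_flatten L 1 ⟨0, rfl⟩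
  rw [hslice, hblocks]
  -- peel indices 0 and 1 off the front of range(len)
  rcases L with _ | ⟨c, t⟩
  · simp [keepFrom]
  rcases t with _ | ⟨d, u⟩
  · simp only [List.length_cons, List.length_nil]
    have h1 : (List.range 1).filter (fun i => !pow2b i) = [0] := by decide
    rw [h1]
    simp [keepFrom, List.getD]
  · have hlen : (c :: d :: u).length = 2 + u.length := by simp; omega
    rw [List.range_eq_range', hlen, range'_split 0 2, List.filter_append, List.map_append]
    have h2 : List.range' 0 2 = [0, 1] := by decide
    rw [h2]
    have hfs : ([0, 1].filter (fun i => !pow2b i)) = [0] := by decide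
    rw [hfs]
    simp only [List.map_cons, List.map_nil, Nat.zero_add]
    congr 1

-- ===== VERDICT (by name: the statement is the Claim_ definition above) =====
theorem remove_characters_spec : Claim_equal_remove_characters := by
  intro s _
  unfold Spec_remove_characters
  exact remove_characters_eq s
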